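-- pv_equiv track=rewrite | github.com/MandaBogdan/Lexer-Python | lab2.py | find_sink
-- ===== SOURCE A (Python) =====
-- from collections import defaultdict
--
-- def find_sink(q0, qfs, d, states):
-- 	rd = defaultdict(dict)
-- 	for state in list(d.keys()):
-- 		for c in d[state]:
-- 			state2 = d[state][c]
-- 			if c not in rd[state2]:
-- 				rd[state2][c] = [state]
-- 			else:
-- 				rd[state2][c].append(state)
-- 	queue = [] + qfs
-- 	visited =  set()
-- 	while len(queue) > 0:
-- 		state = queue.pop(0)
-- 		visited.add(state)
-- 		for c in rd[state]:
-- 			for state2 in rd[state][c]: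
-- 				if state2 not in visited:
-- 					visited.add(state2)
-- 					queue.append(state2)
-- 	return list(set(states) - set(visited))
-- ===== SOURCE B (Python) =====
-- def find_sink(q0, qfs, d, states):
--     # Chaotic-iteration fixpoint on the forward transition table: no reverse
--     # graph, no queue.  Repeatedly sweep d, marking any state that has some
--     # transition into the marked set, until a full sweep changes nothing.
--     reach = set(qfs)
--     changed = True
--     while changed:
--         changed = False
--         for state in d:
--             if state not in reach:
--                 trans = d[state]
--                 if any(trans[c] in reach for c in trans):
--                     reach.add(state)
--                     changed = True
--     return list(set(states) - reach)
-- ===== Notes on version B (the rewrite author's own statement) =====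
-- stated objective: alternative
-- what changed: B drops A's reverse-graph construction and queue-based backward BFS entirely and instead computes the co-reachable set as a chaotic-iteration fixpoint: it repeatedly sweeps the forward transition table, marking every state that has some transition into the marked set, until a full sweep changes nothing.
import Mathlib
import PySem

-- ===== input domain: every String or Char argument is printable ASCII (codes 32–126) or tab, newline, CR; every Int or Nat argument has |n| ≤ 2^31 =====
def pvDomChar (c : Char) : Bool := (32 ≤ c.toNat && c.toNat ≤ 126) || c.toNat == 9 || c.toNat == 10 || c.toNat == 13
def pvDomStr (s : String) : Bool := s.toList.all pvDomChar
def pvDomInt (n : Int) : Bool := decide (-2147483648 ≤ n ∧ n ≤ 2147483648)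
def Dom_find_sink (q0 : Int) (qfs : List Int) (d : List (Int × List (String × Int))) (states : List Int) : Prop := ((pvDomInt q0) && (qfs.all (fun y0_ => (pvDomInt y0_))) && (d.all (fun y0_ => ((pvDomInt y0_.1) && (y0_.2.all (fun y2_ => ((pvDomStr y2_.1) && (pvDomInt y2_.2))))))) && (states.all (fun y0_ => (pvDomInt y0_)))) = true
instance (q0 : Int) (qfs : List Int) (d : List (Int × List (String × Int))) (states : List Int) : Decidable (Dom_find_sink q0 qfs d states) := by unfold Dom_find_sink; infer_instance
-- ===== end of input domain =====

-- B replaces A's reverse-graph construction + queue-based backward BFS by a chaotic-iteration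
-- fixpoint: it builds no reverse graph and keeps no queue, instead it repeatedly sweeps the forward
-- transition table, marking every state with a transition into the marked set, until a sweep
-- changes nothing. Both Pythons return list(set(...)); that list's hash order is not modelled —
-- the output is produced as a PySem.Set and compared as a set.

-- The enqueue step of A's inner loop:
-- "if x not in visited: visited.add(x); queue.append(x)"  on the state (queue, visited)
def stepF (qv : List Int × PySem.Set Int) (t : Int) : List Int × PySem.Set Int :=
  if PySem.Set.contains qv.2 t then qv else (qv.1 ++ [t], PySem.Set.add qv.2 t)

-- number of elements of the universe U not yet visited (termination measure component)
def unvis (U : List Int) (v : PySem.Set Int) : Nat :=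
  (U.filter (fun x => !(PySem.Set.contains v x))).length

lemma unvis_mono (U : List Int) (v : PySem.Set Int) (t : Int) :
    unvis U (PySem.Set.add v t) ≤ unvis U v := by
  apply List.Sublist.length_le
  apply List.monotone_filter_right
  intro a ha
  simp [PySem.Set.mem_add] at *
  tauto

lemma unvis_add_lt (U : List Int) (v : PySem.Set Int) (t : Int) (hU : t ∈ U)
    (hv : PySem.Set.contains v t = false) : unvis U (PySem.Set.add v t) < unvis U v := by
  have hv' : t ∉ v := by simpa using hv
  have heq : U.filter (fun x => !(PySem.Set.contains (PySem.Set.add v t) x))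
      = (U.filter (fun x => !(PySem.Set.contains v x))).filter (fun x => !(x == t)) := by
    rw [List.filter_filter]
    apply List.filter_congr
    intro x _
    simp [PySem.Set.mem_add]
    by_cases h1 : x ∈ v <;> by_cases h2 : x = t <;> simp [h1, h2]
  rw [unvis, unvis, heq]
  apply List.length_filter_lt_length_iff_exists.mpr
  refine ⟨t, List.mem_filter.mpr ⟨hU, by simpa using hv'⟩, by simp⟩

lemma stepF_meas_le (l : List Int) (U : List Int) (hl : ∀ t ∈ l, t ∈ U) :
    ∀ qv : List Int × PySem.Set Int,
      unvis U (l.foldl stepF qv).2 + (l.foldl stepF qv).1.length ≤ unvis U qv.2 + qv.1.length := by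
  induction l with
  | nil => intro qv; simp
  | cons t l ih =>
    intro qv
    simp only [List.foldl_cons]
    by_cases hc : PySem.Set.contains qv.2 t
    · rw [show stepF qv t = qv from by rw [stepF, if_pos hc]]
      exact ih (fun x hx => hl x (List.mem_cons_of_mem _ hx)) qv
    · rw [show stepF qv t = (qv.1 ++ [t], PySem.Set.add qv.2 t) from by
        rw [stepF, if_neg hc]]
      have h1 := ih (fun x hx => hl x (List.mem_cons_of_mem _ hx)) (qv.1 ++ [t], PySem.Set.add qv.2 t)
      have h2 := unvis_add_lt U qv.2 t (hl t (List.mem_cons_self ..)) (by simpa using hc)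
      simp at h1
      omega

-- ===== PORT A =====

-- build rd = defaultdict(dict); rd[state2][c] collects the states with d[state][c] == state2.
-- (c comes from iterating trans's keys, so trans[c] never raises: the getD default 0 is dead.)
def transA (rd : PySem.Dict Int (PySem.Dict String (List Int))) (state : Int) (c : String)
    (state2 : Int) : PySem.Dict Int (PySem.Dict String (List Int)) :=
  let inn := rd.getD state2 PySem.Dict.empty      -- defaultdict access rd[state2]
  if inn.contains c = false then rd.insert state2 (inn.insert c [state])
  else rd.insert state2 (inn.insert c (inn.getD c [] ++ [state]))

def buildA (d : List (Int × List (String × Int))) :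
    PySem.Dict Int (PySem.Dict String (List Int)) :=
  (PySem.Dict.mk d).keys.foldl (fun rd state =>
    let trans := PySem.Dict.mk (((PySem.Dict.mk d).get? state).getD [])  -- d[state], never raises
    trans.keys.foldl (fun rd c => transA rd state c ((trans.get? c).getD 0)) rd)
    PySem.Dict.empty

-- all predecessor states stored anywhere in rd (universe for the termination measure)
def predsA (rd : PySem.Dict Int (PySem.Dict String (List Int))) : List Int :=
  (rd.values.map (fun inn => inn.values.flatten)).flatten

lemma mem_values_of_get? {κ ν : Type} [BEq κ] [LawfulBEq κ] (rd : PySem.Dict κ ν) (k : κ) (v : ν)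
    (h : rd.get? k = some v) : v ∈ rd.values := by
  have hm := PySem.Dict.mem_items_of_get?_eq_some (d := rd) (k := k) (v := v) h
  simp only [PySem.Dict.values]
  exact List.mem_map.mpr ⟨(k, v), hm, rfl⟩

lemma mem_predsA (rd : PySem.Dict Int (PySem.Dict String (List Int))) (s : Int) (c : String)
    (t : Int) (h : t ∈ (rd.getD s PySem.Dict.empty).getD c []) : t ∈ predsA rd := by
  cases hg : rd.get? s with
  | none =>
    simp [PySem.Dict.getD_eq_get?_getD, hg, PySem.Dict.get?_empty] at h
  | some inn =>
    simp only [PySem.Dict.getD_eq_get?_getD, hg, Option.getD_some] at h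
    cases hg2 : inn.get? c with
    | none => rw [hg2] at h; simp at h
    | some l =>
      rw [hg2] at h
      simp only [Option.getD_some] at h
      apply List.mem_flatten.mpr
      refine ⟨inn.values.flatten, List.mem_map.mpr ⟨inn, mem_values_of_get? rd s inn hg, rfl⟩, ?_⟩
      exact List.mem_flatten.mpr ⟨l, mem_values_of_get? inn c l hg2, h⟩

-- the while-loop: pop the queue's head, mark it visited, scan rd[state] char by char,
-- enqueueing every unvisited predecessor
def loopA (rd : PySem.Dict Int (PySem.Dict String (List Int))) (queue : List Int)
    (visited : PySem.Set Int) : PySem.Set Int :=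
  match queue with
  | [] => visited
  | state :: rest =>
    let visited1 := PySem.Set.add visited state
    let inn := rd.getD state PySem.Dict.empty     -- defaultdict access rd[state]
    let qv := inn.keys.foldl (fun qv c => ((inn.getD c []).foldl stepF qv)) (rest, visited1)
    loopA rd qv.1 qv.2
termination_by unvis (predsA rd) visited + queue.length
decreasing_by
  have h1 := stepF_meas_le
    ((rd.getD state PySem.Dict.empty).keys.flatMap
      (fun c => (rd.getD state PySem.Dict.empty).getD c []))
    (predsA rd)
    (by intro t ht
        rcases List.mem_flatMap.mp ht with ⟨c, _, htc⟩
        exact mem_predsA rd state c t htc)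
    (rest, PySem.Set.add visited state)
  rw [List.foldl_flatMap] at h1
  dsimp only at h1
  have h2 := unvis_mono (predsA rd) visited state
  simp only [List.length_cons]
  omega

def find_sink (q0 : Int) (qfs : List Int) (d : List (Int × List (String × Int)))
    (states : List Int) : List Int :=
  let rd := buildA d
  let queue := [] ++ qfs
  let visited : PySem.Set Int := PySem.Set.empty
  PySem.Set.diff (PySem.Set.ofList states) (loopA rd queue visited)

-- ===== PORT B =====

-- "any(trans[c] in reach for c in trans)": some transition of this state leads into reach
def anySucc (trans : PySem.Dict String Int) (r : PySem.Set Int) : Bool :=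
  trans.keys.any (fun c => PySem.Set.contains r ((trans.get? c).getD 0))

-- one step of the sweep over d's keys, on the state (reach, changed)
def sweepStep (d : List (Int × List (String × Int))) (rc : PySem.Set Int × Bool) (state : Int) :
    PySem.Set Int × Bool :=
  if PySem.Set.contains rc.1 state then rc
  else if anySucc (PySem.Dict.mk (((PySem.Dict.mk d).get? state).getD [])) rc.1 then
    (PySem.Set.add rc.1 state, true)
  else rc

-- one full "for state in d:" sweep, starting with changed = False
def sweepB (d : List (Int × List (String × Int))) (r : PySem.Set Int) : PySem.Set Int × Bool :=
  (PySem.Dict.mk d).keys.foldl (sweepStep d) (r, false)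

lemma sweep_fold_unvis_le (d : List (Int × List (String × Int))) (U : List Int) :
    ∀ (l : List Int) (rc : PySem.Set Int × Bool),
      unvis U (l.foldl (sweepStep d) rc).1 ≤ unvis U rc.1 := by
  intro l
  induction l with
  | nil => intro rc; simp
  | cons state l ih =>
    intro rc
    simp only [List.foldl_cons]
    by_cases hc : PySem.Set.contains rc.1 state
    · rw [show sweepStep d rc state = rc from by rw [sweepStep, if_pos hc]]
      exact ih rc
    · by_cases ha : anySucc (PySem.Dict.mk (((PySem.Dict.mk d).get? state).getD [])) rc.1
      · rw [show sweepStep d rc state = (PySem.Set.add rc.1 state, true) from by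
          rw [sweepStep, if_neg hc, if_pos ha]]
        exact le_trans (ih _) (unvis_mono U rc.1 state)
      · rw [show sweepStep d rc state = rc from by rw [sweepStep, if_neg hc, if_neg ha]]
        exact ih rc

lemma sweep_fold_unvis_lt (d : List (Int × List (String × Int))) (U : List Int) :
    ∀ (l : List Int), (∀ x ∈ l, x ∈ U) → ∀ (r : PySem.Set Int),
      (l.foldl (sweepStep d) (r, false)).2 = true →
      unvis U (l.foldl (sweepStep d) (r, false)).1 < unvis U r := by
  intro l
  induction l with
  | nil => intro _ r h; simp at h
  | cons state l ih =>
    intro hl r h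
    simp only [List.foldl_cons] at h ⊢
    by_cases hc : PySem.Set.contains r state
    · rw [show sweepStep d (r, false) state = (r, false) from by rw [sweepStep, if_pos hc]] at h ⊢
      exact ih (fun x hx => hl x (List.mem_cons_of_mem _ hx)) r h
    · by_cases ha : anySucc (PySem.Dict.mk (((PySem.Dict.mk d).get? state).getD [])) r
      · rw [show sweepStep d (r, false) state = (PySem.Set.add r state, true) from by
          rw [sweepStep, if_neg hc, if_pos ha]] at h ⊢
        calc unvis U (l.foldl (sweepStep d) (PySem.Set.add r state, true)).1
            ≤ unvis U (PySem.Set.add r state) := sweep_fold_unvis_le d U l _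
          _ < unvis U r := unvis_add_lt U r state (hl state (List.mem_cons_self ..)) (by simpa using hc)
      · rw [show sweepStep d (r, false) state = (r, false) from by
          rw [sweepStep, if_neg hc, if_neg ha]] at h ⊢
        exact ih (fun x hx => hl x (List.mem_cons_of_mem _ hx)) r h

-- "changed = True; while changed: changed = False; <sweep>"; returns reach once a sweep is silent
def fixB (d : List (Int × List (String × Int))) (r : PySem.Set Int) : PySem.Set Int :=
  if (sweepB d r).2 then fixB d (sweepB d r).1 else r
termination_by unvis ((PySem.Dict.mk d).keys) r
decreasing_by
  exact sweep_fold_unvis_lt d ((PySem.Dict.mk d).keys) ((PySem.Dict.mk d).keys)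
    (fun x hx => hx) r (by assumption)

def find_sink_alt (q0 : Int) (qfs : List Int) (d : List (Int × List (String × Int)))
    (states : List Int) : List Int :=
  let reach := PySem.Set.ofList qfs
  PySem.Set.diff (PySem.Set.ofList states) (fixB d reach)

-- ===== PRECONDITION & SPEC =====
def Spec_find_sink (q0 : Int) (qfs : List Int) (d : List (Int × List (String × Int))) (states : List Int) (out : List Int) : Prop := out = find_sink_alt q0 qfs d states
instance (q0 : Int) (qfs : List Int) (d : List (Int × List (String × Int))) (states : List Int) (out : List Int) : Decidable (Spec_find_sink q0 qfs d states out) := by unfold Spec_find_sink; infer_instance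

-- ===== CLAIM (what is proved, stated in full; the proofs are below) =====
def Claim_equal_find_sink : Prop := ∀ (q0 : Int) (qfs : List Int) (d : List (Int × List (String × Int))) (states : List Int), Dom_find_sink q0 qfs d states → Spec_find_sink q0 qfs d states (find_sink q0 qfs d states)

-- ===== LEMMAS AND PROOFS =====

-- neighbour function of A's BFS loop: the predecessors recorded for s in rd
def NA (rd : PySem.Dict Int (PySem.Dict String (List Int))) (s : Int) : List Int :=
  (rd.getD s PySem.Dict.empty).keys.flatMap (fun c => (rd.getD s PySem.Dict.empty).getD c [])

-- forward successors of t as B reads them straight off the transition table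
def succs (d : List (Int × List (String × Int))) (t : Int) : List Int :=
  (PySem.Dict.mk (((PySem.Dict.mk d).get? t).getD [])).keys.map
    (fun c => ((PySem.Dict.mk (((PySem.Dict.mk d).get? t).getD [])).get? c).getD 0)

-- A's loop is an instance of an abstract BFS over a neighbour function
def gloop (N : Int → List Int) (U : List Int) (hU : ∀ s, ∀ t ∈ N s, t ∈ U)
    (queue : List Int) (visited : PySem.Set Int) : PySem.Set Int :=
  match queue with
  | [] => visited
  | s :: rest =>
    let qv := (N s).foldl stepF (rest, PySem.Set.add visited s)
    gloop N U hU qv.1 qv.2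
termination_by unvis U visited + queue.length
decreasing_by
  have h1 := stepF_meas_le (N s) U (hU s) (rest, PySem.Set.add visited s)
  dsimp only at h1
  have h2 := unvis_mono U visited s
  simp only [List.length_cons]
  omega

lemma loopA_eq_gloop (rd : PySem.Dict Int (PySem.Dict String (List Int))) (q : List Int)
    (v : PySem.Set Int) :
    loopA rd q v = gloop (NA rd) (predsA rd)
      (fun s t ht => by
        rcases List.mem_flatMap.mp ht with ⟨c, _, h⟩
        exact mem_predsA rd s c t h) q v := by
  fun_induction loopA rd q v with
  | case1 => rw [gloop]
  | case2 v state rest vis1 inn qv ih =>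
    rw [gloop]
    have heq : (NA rd state).foldl stepF (rest, PySem.Set.add v state)
        = inn.keys.foldl (fun qv c => ((inn.getD c []).foldl stepF qv)) (rest, PySem.Set.add v state) := by
      rw [NA, List.foldl_flatMap]
    rw [show ((NA rd state).foldl stepF (rest, PySem.Set.add v state)) = qv from heq]
    exact ih

-- membership facts about A's enqueue fold
lemma mem_foldl_stepF_snd (l : List Int) (qv : List Int × PySem.Set Int) (x : Int) :
    x ∈ (l.foldl stepF qv).2 ↔ x ∈ qv.2 ∨ x ∈ l := by
  induction l generalizing qv with
  | nil => simp
  | cons t l ih =>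
    simp only [List.foldl_cons]
    by_cases hc : PySem.Set.contains qv.2 t
    · rw [show stepF qv t = qv from by rw [stepF, if_pos hc]]
      rw [ih]
      have ht : t ∈ qv.2 := by simpa using hc
      simp only [List.mem_cons]
      constructor
      · tauto
      · rintro (h | h | h)
        exacts [Or.inl h, Or.inl (h ▸ ht), Or.inr h]
    · rw [show stepF qv t = (qv.1 ++ [t], PySem.Set.add qv.2 t) from by rw [stepF, if_neg hc]]
      rw [ih]
      simp only [PySem.Set.mem_add, List.mem_cons]
      tauto

lemma foldl_stepF_fst (l : List Int) (qv : List Int × PySem.Set Int) :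
    ∃ ex, (l.foldl stepF qv).1 = qv.1 ++ ex ∧ ∀ t ∈ ex, t ∈ l := by
  induction l generalizing qv with
  | nil => exact ⟨[], by simp⟩
  | cons t l ih =>
    simp only [List.foldl_cons]
    by_cases hc : PySem.Set.contains qv.2 t
    · rw [show stepF qv t = qv from by rw [stepF, if_pos hc]]
      rcases ih qv with ⟨ex, he, hs⟩
      exact ⟨ex, he, fun x hx => List.mem_cons_of_mem _ (hs x hx)⟩
    · rw [show stepF qv t = (qv.1 ++ [t], PySem.Set.add qv.2 t) from by rw [stepF, if_neg hc]]
      rcases ih (qv.1 ++ [t], PySem.Set.add qv.2 t) with ⟨ex, he, hs⟩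
      refine ⟨[t] ++ ex, ?_, ?_⟩
      · rw [he]; simp
      · intro x hx
        rcases List.mem_append.mp hx with hx | hx
        · simp at hx; subst hx; exact List.mem_cons_self ..
        · exact List.mem_cons_of_mem _ (hs x hx)

lemma mem_foldl_stepF_snd_imp_fst (l : List Int) (qv : List Int × PySem.Set Int) (x : Int)
    (h : x ∈ (l.foldl stepF qv).2) : x ∈ qv.2 ∨ x ∈ (l.foldl stepF qv).1 := by
  induction l generalizing qv with
  | nil => exact Or.inl h
  | cons t l ih =>
    simp only [List.foldl_cons] at h ⊢
    by_cases hc : PySem.Set.contains qv.2 t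
    · rw [show stepF qv t = qv from by rw [stepF, if_pos hc]] at h ⊢
      exact ih _ h
    · rw [show stepF qv t = (qv.1 ++ [t], PySem.Set.add qv.2 t) from by rw [stepF, if_neg hc]] at h ⊢
      rcases ih _ h with h2 | h2
      · rcases (PySem.Set.mem_add _ _ _).mp h2 with h3 | h3
        · exact Or.inl h3
        · subst h3
          rcases foldl_stepF_fst l (qv.1 ++ [x], PySem.Set.add qv.2 x) with ⟨ex, he, _⟩
          exact Or.inr (by rw [he]; simp)
      · exact Or.inr h2

-- reachability along the neighbour relation
def RelN (N : Int → List Int) : Int → Int → Prop :=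
  Relation.ReflTransGen (fun a b => b ∈ N a)

-- loop invariant: every visited state that is no longer pending has been expanded
def InvN (N : Int → List Int) (q : List Int) (v : PySem.Set Int) : Prop :=
  ∀ s ∈ v, s ∉ q → ∀ t ∈ N s, t ∈ v

lemma gloop_sub_vis (N : Int → List Int) (U : List Int) (hU : ∀ s, ∀ t ∈ N s, t ∈ U)
    (q : List Int) (v : PySem.Set Int) (x : Int) (h : x ∈ v) : x ∈ gloop N U hU q v := by
  revert h
  fun_induction gloop N U hU q v with
  | case1 => exact id
  | case2 v s rest qv ih =>
    intro h
    exact ih ((mem_foldl_stepF_snd _ _ _).mpr (Or.inl ((PySem.Set.mem_add _ _ _).mpr (Or.inl h))))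

lemma gloop_sub_queue (N : Int → List Int) (U : List Int) (hU : ∀ s, ∀ t ∈ N s, t ∈ U)
    (q : List Int) (v : PySem.Set Int) (x : Int) (h : x ∈ q) : x ∈ gloop N U hU q v := by
  revert h
  fun_induction gloop N U hU q v with
  | case1 => intro h; simp at h
  | case2 v s rest qv ih =>
    intro h
    rcases List.mem_cons.mp h with h | h
    · subst h
      exact gloop_sub_vis _ _ _ _ _ _
        ((mem_foldl_stepF_snd _ _ _).mpr (Or.inl ((PySem.Set.mem_add _ _ _).mpr (Or.inr rfl))))
    · apply ih
      rcases foldl_stepF_fst (N s) (rest, PySem.Set.add v s) with ⟨ex, he, _⟩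
      rw [he]
      exact List.mem_append.mpr (Or.inl h)

lemma gloop_closed (N : Int → List Int) (U : List Int) (hU : ∀ s, ∀ t ∈ N s, t ∈ U)
    (q : List Int) (v : PySem.Set Int) (hInv : InvN N q v) :
    ∀ s ∈ gloop N U hU q v, ∀ t ∈ N s, t ∈ gloop N U hU q v := by
  revert hInv
  fun_induction gloop N U hU q v with
  | case1 v =>
    intro hInv s hs t ht
    exact hInv s hs (by simp) t ht
  | case2 v s rest qv ih =>
    intro hInv
    apply ih
    intro s' hs' hnq t ht
    have hsnd := (mem_foldl_stepF_snd (N s) (rest, PySem.Set.add v s) s').mp hs'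
    have hs'old : s' ∈ PySem.Set.add v s := by
      rcases hsnd with h | h
      · exact h
      · rcases mem_foldl_stepF_snd_imp_fst (N s) (rest, PySem.Set.add v s) s' hs' with h2 | h2
        · exact h2
        · exact absurd h2 hnq
    rcases (PySem.Set.mem_add _ _ _).mp hs'old with h | h
    · by_cases hss : s' = s
      · subst hss
        exact (mem_foldl_stepF_snd _ _ _).mpr (Or.inr ht)
      · have hrest : s' ∉ rest := by
          intro hr
          apply hnq
          rcases foldl_stepF_fst (N s) (rest, PySem.Set.add v s) with ⟨ex, he, _⟩
          rw [he]
          exact List.mem_append.mpr (Or.inl hr)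
        have : s' ∉ s :: rest := by
          simp only [List.mem_cons]
          push Not
          exact ⟨hss, hrest⟩
        exact (mem_foldl_stepF_snd _ _ _).mpr
          (Or.inl ((PySem.Set.mem_add _ _ _).mpr (Or.inl (hInv s' h this t ht))))
    · subst h
      exact (mem_foldl_stepF_snd _ _ _).mpr (Or.inr ht)

lemma gloop_sound (N : Int → List Int) (U : List Int) (hU : ∀ s, ∀ t ∈ N s, t ∈ U)
    (q : List Int) (v : PySem.Set Int) (x : Int) (h : x ∈ gloop N U hU q v) :
    x ∈ v ∨ ∃ s ∈ q, RelN N s x := by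
  revert h
  fun_induction gloop N U hU q v with
  | case1 v => exact fun h => Or.inl h
  | case2 v s rest qv ih =>
    intro h
    rcases ih h with h2 | ⟨s', hs', hrel⟩
    · rcases (mem_foldl_stepF_snd _ _ _).mp h2 with h3 | h3
      · rcases (PySem.Set.mem_add _ _ _).mp h3 with h4 | h4
        · exact Or.inl h4
        · exact Or.inr ⟨s, List.mem_cons_self .., h4 ▸ Relation.ReflTransGen.refl⟩
      · exact Or.inr ⟨s, List.mem_cons_self .., Relation.ReflTransGen.single h3⟩
    · rcases foldl_stepF_fst (N s) (rest, PySem.Set.add v s) with ⟨ex, he, hex⟩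
      rw [he] at hs'
      rcases List.mem_append.mp hs' with h3 | h3
      · exact Or.inr ⟨s', List.mem_cons_of_mem _ h3, hrel⟩
      · exact Or.inr ⟨s, List.mem_cons_self .., Relation.ReflTransGen.head (hex s' h3) hrel⟩

lemma mem_gloop_empty (N : Int → List Int) (U : List Int) (hU : ∀ s, ∀ t ∈ N s, t ∈ U)
    (q : List Int) (x : Int) :
    x ∈ gloop N U hU q PySem.Set.empty ↔ ∃ s ∈ q, RelN N s x := by
  constructor
  · intro h
    rcases gloop_sound N U hU q PySem.Set.empty x h with h | h
    · simp [PySem.Set.empty] at h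
    · exact h
  · rintro ⟨s, hs, hrel⟩
    induction hrel with
    | refl => exact gloop_sub_queue N U hU q _ s hs
    | tail _ hstep ih => exact gloop_closed N U hU q _ (by intro a ha; simp [PySem.Set.empty] at ha) _ ih _ hstep

-- one elementary transition (state -c-> state2) adds state as a predecessor of state2
lemma NA_transA (rd : PySem.Dict Int (PySem.Dict String (List Int))) (s0 : Int) (c : String)
    (s2 s t : Int) :
    (t ∈ NA (transA rd s0 c s2) s) ↔ (t ∈ NA rd s ∨ (s = s2 ∧ t = s0)) := by
  have htrans : transA rd s0 c s2
      = rd.insert s2 ((rd.getD s2 PySem.Dict.empty).insert c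
          ((rd.getD s2 PySem.Dict.empty).getD c [] ++ [s0])) := by
    rw [transA]
    by_cases hc : (rd.getD s2 PySem.Dict.empty).contains c
    · simp [hc]
    · rw [Bool.not_eq_true] at hc
      simp [hc, PySem.Dict.getD_of_not_contains _ _ hc]
  rw [htrans]
  by_cases hs : s = s2
  · subst hs
    simp only [NA, PySem.Dict.getD_insert_self, List.mem_flatMap]
    constructor
    · rintro ⟨c', hk, ht⟩
      rcases (PySem.Dict.mem_keys_insert _ _ _ _).mp hk with hck | hck
      · subst hck
        rw [PySem.Dict.getD_insert_self] at ht
        rcases List.mem_append.mp ht with ht | ht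
        · by_cases hcc : (rd.getD s PySem.Dict.empty).contains c'
          · exact Or.inl ⟨c', (PySem.Dict.contains_iff_mem_keys _ _).mp hcc, ht⟩
          · rw [Bool.not_eq_true] at hcc
            rw [PySem.Dict.getD_of_not_contains _ _ hcc] at ht
            simp at ht
        · simp at ht
          exact Or.inr ⟨by trivial, ht⟩
      · by_cases hcc : c' = c
        · subst hcc
          rw [PySem.Dict.getD_insert_self] at ht
          rcases List.mem_append.mp ht with ht | ht
          · exact Or.inl ⟨c', hck, ht⟩
          · simp at ht
            exact Or.inr ⟨by trivial, ht⟩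
        · rw [PySem.Dict.getD_insert_of_ne _ _ _ hcc] at ht
          exact Or.inl ⟨c', hck, ht⟩
    · rintro (⟨c', hk, ht⟩ | ⟨-, ht⟩)
      · by_cases hcc : c' = c
        · subst hcc
          exact ⟨c', (PySem.Dict.mem_keys_insert _ _ _ _).mpr (Or.inl rfl),
            by rw [PySem.Dict.getD_insert_self]; exact List.mem_append.mpr (Or.inl ht)⟩
        · exact ⟨c', (PySem.Dict.mem_keys_insert _ _ _ _).mpr (Or.inr hk),
            by rw [PySem.Dict.getD_insert_of_ne _ _ _ hcc]; exact ht⟩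
      · subst ht
        exact ⟨c, (PySem.Dict.mem_keys_insert _ _ _ _).mpr (Or.inl rfl),
          by rw [PySem.Dict.getD_insert_self]; exact List.mem_append.mpr (Or.inr (by simp))⟩
  · simp only [NA, PySem.Dict.getD_insert_of_ne _ _ _ hs]
    simp [hs]

-- the inner fold over one state's transitions, NA-membership-wise
lemma NA_fold_inner (cs : List String) (state : Int) (tgt : String → Int)
    (rd : PySem.Dict Int (PySem.Dict String (List Int))) (s t : Int) :
    t ∈ NA (cs.foldl (fun rd c => transA rd state c (tgt c)) rd) s ↔
      t ∈ NA rd s ∨ (t = state ∧ s ∈ cs.map tgt) := by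
  induction cs generalizing rd with
  | nil => simp
  | cons c cs ih =>
    simp only [List.foldl_cons]
    rw [ih, NA_transA]
    simp only [List.map_cons, List.mem_cons]
    constructor
    · rintro ((h | ⟨rfl, rfl⟩) | ⟨rfl, h⟩)
      · exact Or.inl h
      · exact Or.inr ⟨rfl, Or.inl rfl⟩
      · exact Or.inr ⟨rfl, Or.inr h⟩
    · rintro (h | ⟨rfl, (rfl | h)⟩)
      · exact Or.inl (Or.inl h)
      · exact Or.inl (Or.inr ⟨rfl, rfl⟩)
      · exact Or.inr ⟨rfl, h⟩

-- characterisation of A's reverse graph: t is a recorded predecessor of s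
-- exactly when the table gives t a transition into s
lemma mem_NA_buildA (d : List (Int × List (String × Int))) (s t : Int) :
    t ∈ NA (buildA d) s ↔ s ∈ succs d t := by
  have hout : ∀ (l : List Int) (rd : PySem.Dict Int (PySem.Dict String (List Int))),
      t ∈ NA (l.foldl (fun rd state =>
        (PySem.Dict.mk (((PySem.Dict.mk d).get? state).getD [])).keys.foldl
          (fun rd c => transA rd state c
            (((PySem.Dict.mk (((PySem.Dict.mk d).get? state).getD [])).get? c).getD 0)) rd) rd) s
        ↔ t ∈ NA rd s ∨ (t ∈ l ∧ s ∈ succs d t) := by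
    intro l
    induction l with
    | nil => simp
    | cons state l ih =>
      intro rd
      simp only [List.foldl_cons]
      rw [ih, NA_fold_inner]
      simp only [List.mem_cons]
      constructor
      · rintro ((h | ⟨rfl, h⟩) | ⟨h1, h2⟩)
        · exact Or.inl h
        · exact Or.inr ⟨Or.inl rfl, h⟩
        · exact Or.inr ⟨Or.inr h1, h2⟩
      · rintro (h | ⟨(rfl | h1), h2⟩)
        · exact Or.inl (Or.inl h)
        · exact Or.inl (Or.inr ⟨rfl, h2⟩)
        · exact Or.inr ⟨h1, h2⟩
  have hkeys : s ∈ succs d t → t ∈ (PySem.Dict.mk d).keys := by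
    intro h
    by_contra hk
    have hn : (PySem.Dict.mk d).get? t = none :=
      (PySem.Dict.get?_eq_none_iff_not_mem_keys _ _).mpr hk
    simp [succs, hn] at h
  rw [buildA, hout]
  have hbase : NA (PySem.Dict.empty : PySem.Dict Int (PySem.Dict String (List Int))) s = [] := by
    simp [NA, PySem.Dict.getD_empty, PySem.Dict.keys_empty]
  rw [hbase]
  simp only [List.not_mem_nil, false_or]
  constructor
  · rintro ⟨_, h⟩; exact h
  · intro h; exact ⟨hkeys h, h⟩

-- B's any(...) test, read as a statement about successors
lemma anySucc_iff (d : List (Int × List (String × Int))) (state : Int) (r : PySem.Set Int) :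
    anySucc (PySem.Dict.mk (((PySem.Dict.mk d).get? state).getD [])) r = true ↔
      ∃ s ∈ succs d state, s ∈ r := by
  simp only [anySucc, succs, List.any_eq_true, List.mem_map]
  constructor
  · rintro ⟨c, hc, h⟩
    exact ⟨_, ⟨c, hc, rfl⟩, by simpa [PySem.Set.contains_iff] using h⟩
  · rintro ⟨s, ⟨c, hc, rfl⟩, h⟩
    exact ⟨c, hc, by simpa [PySem.Set.contains_iff] using h⟩

-- the sweep only grows reach
lemma sweep_fold_mono (d : List (Int × List (String × Int))) (l : List Int)
    (rc : PySem.Set Int × Bool) (x : Int) (h : x ∈ rc.1) :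
    x ∈ (l.foldl (sweepStep d) rc).1 := by
  induction l generalizing rc with
  | nil => exact h
  | cons state l ih =>
    simp only [List.foldl_cons]
    by_cases hc : PySem.Set.contains rc.1 state
    · rw [show sweepStep d rc state = rc from by rw [sweepStep, if_pos hc]]
      exact ih rc h
    · by_cases ha : anySucc (PySem.Dict.mk (((PySem.Dict.mk d).get? state).getD [])) rc.1
      · rw [show sweepStep d rc state = (PySem.Set.add rc.1 state, true) from by
          rw [sweepStep, if_neg hc, if_pos ha]]
        exact ih _ ((PySem.Set.mem_add _ _ _).mpr (Or.inl h))
      · rw [show sweepStep d rc state = rc from by rw [sweepStep, if_neg hc, if_neg ha]]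
        exact ih rc h

lemma fixB_mono (d : List (Int × List (String × Int))) (r : PySem.Set Int) (x : Int)
    (h : x ∈ r) : x ∈ fixB d r := by
  revert h
  fun_induction fixB d r with
  | case1 r _ ih => exact fun h => ih (sweep_fold_mono d _ (r, false) x h)
  | case2 => exact id

-- everything the sweep marks can reach the initially marked set
lemma sweep_fold_sound (d : List (Int × List (String × Int))) (qfs : List Int) (l : List Int)
    (rc : PySem.Set Int × Bool)
    (hr : ∀ x ∈ rc.1, ∃ qf ∈ qfs, RelN (NA (buildA d)) qf x) :
    ∀ x ∈ (l.foldl (sweepStep d) rc).1, ∃ qf ∈ qfs, RelN (NA (buildA d)) qf x := by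
  induction l generalizing rc with
  | nil => exact hr
  | cons state l ih =>
    simp only [List.foldl_cons]
    by_cases hc : PySem.Set.contains rc.1 state
    · rw [show sweepStep d rc state = rc from by rw [sweepStep, if_pos hc]]
      exact ih rc hr
    · by_cases ha : anySucc (PySem.Dict.mk (((PySem.Dict.mk d).get? state).getD [])) rc.1
      · rw [show sweepStep d rc state = (PySem.Set.add rc.1 state, true) from by
          rw [sweepStep, if_neg hc, if_pos ha]]
        apply ih
        intro x hx
        rcases (PySem.Set.mem_add _ _ _).mp hx with hx | hx
        · exact hr x hx
        · subst hx
          rcases (anySucc_iff d x rc.1).mp ha with ⟨s, hsucc, hsr⟩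
          rcases hr s hsr with ⟨qf, hqf, hrel⟩
          exact ⟨qf, hqf, hrel.tail ((mem_NA_buildA d s x).mpr hsucc)⟩
      · rw [show sweepStep d rc state = rc from by rw [sweepStep, if_neg hc, if_neg ha]]
        exact ih rc hr

lemma fixB_sound (d : List (Int × List (String × Int))) (qfs : List Int) (r : PySem.Set Int)
    (hr : ∀ x ∈ r, ∃ qf ∈ qfs, RelN (NA (buildA d)) qf x) :
    ∀ x ∈ fixB d r, ∃ qf ∈ qfs, RelN (NA (buildA d)) qf x := by
  revert hr
  fun_induction fixB d r with
  | case1 r _ ih => exact fun hr => ih (sweep_fold_sound d qfs _ (r, false) hr)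
  | case2 => exact fun hr => hr

-- the changed flag never resets during a sweep
lemma sweep_fold_flag_mono (d : List (Int × List (String × Int))) (l : List Int)
    (rc : PySem.Set Int × Bool) (h : rc.2 = true) : (l.foldl (sweepStep d) rc).2 = true := by
  induction l generalizing rc with
  | nil => exact h
  | cons state l ih =>
    simp only [List.foldl_cons]
    by_cases hc : PySem.Set.contains rc.1 state
    · rw [show sweepStep d rc state = rc from by rw [sweepStep, if_pos hc]]
      exact ih rc h
    · by_cases ha : anySucc (PySem.Dict.mk (((PySem.Dict.mk d).get? state).getD [])) rc.1
      · rw [show sweepStep d rc state = (PySem.Set.add rc.1 state, true) from by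
          rw [sweepStep, if_neg hc, if_pos ha]]
        exact ih _ rfl
      · rw [show sweepStep d rc state = rc from by rw [sweepStep, if_neg hc, if_neg ha]]
        exact ih rc h

-- a silent sweep certifies that no key outside reach has a transition into reach
lemma sweep_fold_false_closed (d : List (Int × List (String × Int))) (l : List Int)
    (r : PySem.Set Int) (hfix : (l.foldl (sweepStep d) (r, false)).2 = false) :
    ∀ state ∈ l, state ∈ r ∨
      anySucc (PySem.Dict.mk (((PySem.Dict.mk d).get? state).getD [])) r = false := by
  induction l with
  | nil => intro state h; simp at h
  | cons state0 l ih =>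
    simp only [List.foldl_cons] at hfix
    by_cases hc : PySem.Set.contains r state0
    · rw [show sweepStep d (r, false) state0 = (r, false) from by rw [sweepStep, if_pos hc]] at hfix
      intro state hst
      rcases List.mem_cons.mp hst with rfl | hst
      · exact Or.inl (by simpa [PySem.Set.contains_iff] using hc)
      · exact ih hfix state hst
    · by_cases ha : anySucc (PySem.Dict.mk (((PySem.Dict.mk d).get? state0).getD [])) r
      · rw [show sweepStep d (r, false) state0 = (PySem.Set.add r state0, true) from by
          rw [sweepStep, if_neg hc, if_pos ha]] at hfix
        exact absurd (sweep_fold_flag_mono d l (PySem.Set.add r state0, true) rfl)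
          (by simp [hfix])
      · rw [show sweepStep d (r, false) state0 = (r, false) from by
          rw [sweepStep, if_neg hc, if_neg ha]] at hfix
        intro state hst
        rcases List.mem_cons.mp hst with rfl | hst
        · exact Or.inr (by simpa using ha)
        · exact ih hfix state hst

-- if t has a transition at all, t is a key of the table
lemma mem_keys_of_succs (d : List (Int × List (String × Int))) (s t : Int)
    (h : s ∈ succs d t) : t ∈ (PySem.Dict.mk d).keys := by
  by_contra hk
  have hn : (PySem.Dict.mk d).get? t = none :=
    (PySem.Dict.get?_eq_none_iff_not_mem_keys _ _).mpr hk
  simp [succs, hn] at h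

-- the fixpoint is closed: no state outside it has a transition into it
lemma fixB_closed (d : List (Int × List (String × Int))) (r : PySem.Set Int) :
    ∀ state, state ∉ fixB d r → ∀ s ∈ succs d state, s ∉ fixB d r := by
  fun_induction fixB d r with
  | case1 r _ ih => exact ih
  | case2 r hfalse =>
    intro state hst s hsucc hs
    have hkey : state ∈ (PySem.Dict.mk d).keys := mem_keys_of_succs d s state hsucc
    rcases sweep_fold_false_closed d _ r (by simpa [sweepB] using hfalse) state hkey with h | h
    · exact hst h
    · have : ∃ x ∈ succs d state, x ∈ r := ⟨s, hsucc, hs⟩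
      rw [← anySucc_iff d state r] at this
      simp [h] at this

-- every state that can reach the initial set is marked by the fixpoint
lemma fixB_complete (d : List (Int × List (String × Int))) (r : PySem.Set Int) (qf x : Int)
    (hqf : qf ∈ r) (hrel : RelN (NA (buildA d)) qf x) : x ∈ fixB d r := by
  induction hrel with
  | refl => exact fixB_mono d r qf hqf
  | tail _ hstep ih =>
    rename_i a b _
    by_contra hb
    exact fixB_closed d r b hb a ((mem_NA_buildA d a b).mp hstep) ih

-- the two marked sets have the same members
lemma visited_equiv (qfs : List Int) (d : List (Int × List (String × Int))) (x : Int) :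
    x ∈ loopA (buildA d) qfs PySem.Set.empty ↔ x ∈ fixB d (PySem.Set.ofList qfs) := by
  rw [loopA_eq_gloop, mem_gloop_empty]
  constructor
  · rintro ⟨qf, hqf, hrel⟩
    exact fixB_complete d _ qf x (by simpa [PySem.Set.mem_ofList] using hqf) hrel
  · intro h
    exact fixB_sound d qfs _ (fun y hy => ⟨y, by simpa [PySem.Set.mem_ofList] using hy,
      Relation.ReflTransGen.refl⟩) x h

lemma diff_congr (s : List Int) (vA vB : PySem.Set Int) (h : ∀ x, x ∈ vA ↔ x ∈ vB) :
    PySem.Set.diff s vA = PySem.Set.diff s vB := by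
  show s.filter (fun x => !(PySem.Set.contains vA x)) = s.filter (fun x => !(PySem.Set.contains vB x))
  apply List.filter_congr
  intro x _
  simp [h x]

-- ===== VERDICT (by name: the statement is the Claim_ definition above) =====
theorem find_sink_spec : Claim_equal_find_sink := by
  intro q0 qfs d states _
  unfold Spec_find_sink find_sink find_sink_alt
  simp only [List.nil_append]
  exact diff_congr _ _ _ (visited_equiv qfs d)
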